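-- pv_equiv track=rewrite | github.com/echoaj/CodingChallenges | Amazon_Interview/q1.py | sortBoxes
-- ===== SOURCE A (Python) =====
-- def sorter(lst):
--     first = lst.pop(0)
--     str = " ".join(lst)
--     lst.insert(0, first)
--     return str
--
-- def sortBoxes(boxList):
--     oldBoxes = []
--     newBoxes = []
--     for box in boxList:
--         tokens = box.split()
--         second = tokens[1][0]
--         if second.isalpha():
--             oldBoxes.append(tokens)
--         else:
--             newBoxes.append(tokens)
--     oldBoxes.sort(key=sorter)
--     newBoxes.sort(key=sorter)
--     total = []
--     for lst in oldBoxes: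
--         total.append(" ".join(lst))
--     for lst in newBoxes:
--         total.append(" ".join(lst))
--     return total
-- ===== SOURCE B (Python) =====
-- def sortBoxes(boxList):
--     boxes = [box.split() for box in boxList]
--     ordered = sorted(boxes, key=lambda t: (0 if t[1][0].isalpha() else 1, " ".join(t[1:])))
--     return [" ".join(t) for t in ordered]
-- ===== Notes on version B (the rewrite author's own statement) =====
-- stated objective: simpler
-- what changed: Replaces the partition-into-two-lists-plus-two-separate-sorts with a single stable sort of the tokenized boxes under the composite key (group, joined tail), relying on sort stability for the grouping.
import Mathlib
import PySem

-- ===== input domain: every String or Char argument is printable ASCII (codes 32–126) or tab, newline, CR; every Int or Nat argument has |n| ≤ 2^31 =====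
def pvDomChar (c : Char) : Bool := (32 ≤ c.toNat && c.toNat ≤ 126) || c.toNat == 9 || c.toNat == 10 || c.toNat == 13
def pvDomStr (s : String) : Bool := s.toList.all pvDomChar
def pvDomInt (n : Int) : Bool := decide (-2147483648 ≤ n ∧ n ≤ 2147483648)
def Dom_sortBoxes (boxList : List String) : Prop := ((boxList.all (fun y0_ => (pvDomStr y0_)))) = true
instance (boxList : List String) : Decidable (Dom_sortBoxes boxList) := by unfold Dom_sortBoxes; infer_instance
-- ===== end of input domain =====

-- B replaces A's partition-into-two-lists + two separate sorts by ONE stable sort of the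
-- tokenized boxes under the composite key (group, joined tail): simpler, same cost.

-- ===== PORT A =====
-- sorter(lst): first = lst.pop(0); str = " ".join(lst); lst.insert(0, first); return str —
-- the net effect on a nonempty lst is the key " ".join(lst[1:]) with lst left unchanged; every
-- list it is applied to below has ≥ 2 tokens under Pre_, so `tail` is exact (pop(0) on [] raises).
def sorterA (lst : List String) : String := PySem.Str.join " " lst.tail

def sortBoxes (boxList : List String) : List String :=
  let part := boxList.foldl (fun (acc : List (List String) × List (List String)) box =>
    let tokens := PySem.Str.split₀ box
    match (PySem.List.pyGet? tokens 1).bind (fun t => PySem.Str.pyGet? t 0) with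
    | none => acc   -- Python raises IndexError here (tokens[1][0]); excluded by Pre_sortBoxes
    | some second =>
      if PySem.Str.isalpha second then (acc.1 ++ [tokens], acc.2) else (acc.1, acc.2 ++ [tokens]))
    ([], [])
  let oldBoxes := PySem.List.sorted part.1 sorterA
  let newBoxes := PySem.List.sorted part.2 sorterA
  let total := oldBoxes.foldl (fun acc lst => acc ++ [PySem.Str.join " " lst]) []
  newBoxes.foldl (fun acc lst => acc ++ [PySem.Str.join " " lst]) total

-- ===== PORT B =====
-- 0 if t[1][0].isalpha() else 1
def grpB (t : List String) : Int :=
  match (PySem.List.pyGet? t 1).bind (fun s => PySem.Str.pyGet? s 0) with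
  | none => 1   -- Python raises IndexError here (t[1][0]); excluded by Pre_sortBoxes
  | some c => if PySem.Str.isalpha c then 0 else 1

-- " ".join(t[1:])
def tailKeyB (t : List String) : String := PySem.Str.join " " (PySem.List.slice t (some 1))

def sortBoxes_alt (boxList : List String) : List String :=
  let boxes := boxList.map PySem.Str.split₀
  (PySem.List.sorted2 boxes grpB tailKeyB).map (fun t => PySem.Str.join " " t)

-- ===== PRECONDITION & SPEC =====
-- A raises IndexError when some box splits into fewer than 2 tokens (tokens[1][0]); the
-- nonempty-token conjunct excludes nothing (str.split() never yields empty pieces), it only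
-- makes that shape explicit.
def Pre_sortBoxes (boxList : List String) : Prop :=
  ∀ box ∈ boxList, 1 < (PySem.Str.split₀ box).length ∧ ∀ t ∈ PySem.Str.split₀ box, t.toList ≠ []
instance (boxList : List String) : Decidable (Pre_sortBoxes boxList) := by unfold Pre_sortBoxes; infer_instance

def pvWitness_sortBoxes : List String := ["3 abc def", "1 27 9", "2 zz 1"]

def Spec_sortBoxes (boxList : List String) (out : List String) : Prop := out = sortBoxes_alt boxList
instance (boxList : List String) (out : List String) : Decidable (Spec_sortBoxes boxList out) := by unfold Spec_sortBoxes; infer_instance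

-- ===== CLAIM (what is proved, stated in full; the proofs are below) =====
def Claim_equal_sortBoxes : Prop := ∀ (boxList : List String), Dom_sortBoxes boxList → Pre_sortBoxes boxList → Spec_sortBoxes boxList (sortBoxes boxList)

-- ===== LEMMAS AND PROOFS =====

-- B's key " ".join(t[1:]) is A's sorter key: " ".join on the tail.
theorem tailKeyB_eq : tailKeyB = sorterA := by
  funext t
  simp [tailKeyB, sorterA, PySem.List.slice_from (xs := t) (a := 1) (by norm_num), List.drop_one]

theorem grpB_cases (t : List String) : grpB t = 0 ∨ grpB t = 1 := by
  unfold grpB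
  rcases (PySem.List.pyGet? t 1).bind (fun s => PySem.Str.pyGet? s 0) with _ | c
  · right; rfl
  · by_cases hc : PySem.Str.isalpha c = true <;> simp [hc]

-- the element comparator of B's single sort (sorted2, reverse=false) …
def before2 (a b : List String) : Bool :=
  decide (grpB a < grpB b) || (!decide (grpB b < grpB a) && decide (tailKeyB a < tailKeyB b))

-- … and of A's two per-group sorts
def beforeK (a b : List String) : Bool := decide (sorterA a < sorterA b)

theorem before2_of_eq_grp {a b : List String} (h : grpB a = grpB b) :
    before2 a b = beforeK a b := by
  simp [before2, beforeK, h, tailKeyB_eq]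

theorem insertBy_congr {α : Type} (f g : α → α → Bool) (x : α) (ys : List α)
    (h : ∀ y ∈ ys, f x y = g x y) :
    PySem.List.insertBy f x ys = PySem.List.insertBy g x ys := by
  induction ys with
  | nil => rfl
  | cons y ys ih =>
    have hy := h y (by simp)
    by_cases hb : g x y = true <;>
      simp [PySem.List.insertBy, hy, hb, ih (fun z hz => h z (by simp [hz]))]

-- a group-0 element is inserted inside the group-0 prefix
theorem insertBy_grp0 (x : List String) (hx : grpB x = 0) (a0 a1 : List (List String))
    (h0 : ∀ t ∈ a0, grpB t = 0) (h1 : ∀ t ∈ a1, grpB t = 1) :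
    PySem.List.insertBy before2 x (a0 ++ a1) = PySem.List.insertBy beforeK x a0 ++ a1 := by
  induction a0 with
  | nil =>
    cases a1 with
    | nil => rfl
    | cons y ys =>
      have hy : grpB y = 1 := h1 y (by simp)
      have hb : before2 x y = true := by simp [before2, hx, hy]
      simp [PySem.List.insertBy, hb]
  | cons y a0 ih =>
    have hb : before2 x y = beforeK x y := before2_of_eq_grp (by rw [hx, h0 y (by simp)])
    by_cases hk : beforeK x y = true <;>
      simp [PySem.List.insertBy, hb, hk, ih (fun t ht => h0 t (by simp [ht]))]

-- a group-1 element is inserted inside the group-1 suffix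
theorem insertBy_grp1 (x : List String) (hx : grpB x = 1) (a0 a1 : List (List String))
    (h0 : ∀ t ∈ a0, grpB t = 0) (h1 : ∀ t ∈ a1, grpB t = 1) :
    PySem.List.insertBy before2 x (a0 ++ a1) = a0 ++ PySem.List.insertBy beforeK x a1 := by
  induction a0 with
  | nil =>
    simpa using insertBy_congr before2 beforeK x a1
      (fun y hy => before2_of_eq_grp (by rw [hx, h1 y hy]))
  | cons y a0 ih =>
    have hb : before2 x y = false := by simp [before2, hx, h0 y (by simp)]
    simp [PySem.List.insertBy, hb, ih (fun t ht => h0 t (by simp [ht]))]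

-- one stable insertion sort under the composite key is the two per-group insertion sorts
theorem foldl_split (xs : List (List String)) (a0 a1 : List (List String))
    (h0 : ∀ t ∈ a0, grpB t = 0) (h1 : ∀ t ∈ a1, grpB t = 1) :
    xs.foldl (fun acc x => PySem.List.insertBy before2 x acc) (a0 ++ a1)
      = (xs.filter (fun t => grpB t == 0)).foldl
          (fun acc x => PySem.List.insertBy beforeK x acc) a0
        ++ (xs.filter (fun t => !(grpB t == 0))).foldl
          (fun acc x => PySem.List.insertBy beforeK x acc) a1 := by
  induction xs generalizing a0 a1 with
  | nil => simp
  | cons x xs ih =>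
    rcases grpB_cases x with hx | hx
    · have hp : (grpB x == 0) = true := by simp [hx]
      simp only [List.foldl_cons, List.filter_cons, hp, Bool.not_true, if_true, if_false,
        Bool.false_eq_true]
      rw [insertBy_grp0 x hx a0 a1 h0 h1,
        ih (PySem.List.insertBy beforeK x a0) a1
          (fun t ht => ((PySem.List.mem_insertBy beforeK x t a0).1 ht).elim
            (fun e => e ▸ hx) (h0 t)) h1]
    · have hp : (grpB x == 0) = false := by simp [hx]
      simp only [List.foldl_cons, List.filter_cons, hp, Bool.not_false, if_true, if_false,
        Bool.false_eq_true]
      rw [insertBy_grp1 x hx a0 a1 h0 h1,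
        ih a0 (PySem.List.insertBy beforeK x a1) h0
          (fun t ht => ((PySem.List.mem_insertBy beforeK x t a1).1 ht).elim
            (fun e => e ▸ hx) (h1 t))]

-- under Pre_, A's branch on tokens[1][0].isalpha() is the test grpB tokens == 0
theorem bind_eq_some (box : String)
    (hlen : 1 < (PySem.Str.split₀ box).length)
    (hne : ∀ t ∈ PySem.Str.split₀ box, t.toList ≠ []) :
    ∃ c, (PySem.List.pyGet? (PySem.Str.split₀ box) 1).bind (fun t => PySem.Str.pyGet? t 0)
      = some c := by
  have hget : PySem.List.pyGet? (PySem.Str.split₀ box) 1 = some (PySem.Str.split₀ box)[1] := by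
    simp [PySem.List.pyGet?, PySem.List.pyIdx?, hlen]
  obtain ⟨c, cs, hc⟩ : ∃ c cs, ((PySem.Str.split₀ box)[1]).toList = c :: cs := by
    rcases h : ((PySem.Str.split₀ box)[1]).toList with _ | ⟨c, cs⟩
    · exact absurd h (hne _ (List.getElem_mem _))
    · exact ⟨c, cs, rfl⟩
  have hpos : 0 < (PySem.Str.split₀ box)[1].length := by
    rw [← String.length_toList, hc]; simp
  refine ⟨c, ?_⟩
  rw [hget]
  simp [PySem.Str.pyGet?, PySem.Chars.pyGet?, PySem.List.pyGet?, PySem.List.pyIdx?, hc, hpos]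

theorem stepA_eq (box : String)
    (hlen : 1 < (PySem.Str.split₀ box).length)
    (hne : ∀ t ∈ PySem.Str.split₀ box, t.toList ≠ [])
    (acc : List (List String) × List (List String)) :
    (match (PySem.List.pyGet? (PySem.Str.split₀ box) 1).bind (fun t => PySem.Str.pyGet? t 0) with
     | none => acc
     | some second =>
       if PySem.Str.isalpha second
       then (acc.1 ++ [PySem.Str.split₀ box], acc.2)
       else (acc.1, acc.2 ++ [PySem.Str.split₀ box]))
      = ((if grpB (PySem.Str.split₀ box) == 0 then acc.1 ++ [PySem.Str.split₀ box] else acc.1),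
         (if grpB (PySem.Str.split₀ box) == 0 then acc.2 else acc.2 ++ [PySem.Str.split₀ box])) := by
  obtain ⟨c, hc⟩ := bind_eq_some box hlen hne
  have hg : grpB (PySem.Str.split₀ box) = if PySem.Str.isalpha c then 0 else 1 := by
    unfold grpB; rw [hc]
  rw [hc]
  by_cases ha : PySem.Str.isalpha c = true <;> simp [ha, hg]

-- A's two per-group insertion sorts / B's single sort, as folds
theorem sortedK_eq (xs : List (List String)) :
    PySem.List.sorted xs sorterA
      = xs.foldl (fun acc x => PySem.List.insertBy beforeK x acc) [] := by
  rw [PySem.List.sorted_eq_foldl_insertBy]; rfl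

theorem sorted2_eq (xs : List (List String)) :
    PySem.List.sorted2 xs grpB tailKeyB
      = xs.foldl (fun acc x => PySem.List.insertBy before2 x acc) [] := rfl

theorem sortBoxes_spec : Claim_equal_sortBoxes := by
  intro boxList _ hpre
  unfold Spec_sortBoxes sortBoxes sortBoxes_alt
  simp only []
  rw [PySem.List.foldl_congr_mem' boxList _
      (fun acc box =>
        ((if grpB (PySem.Str.split₀ box) == 0 then acc.1 ++ [PySem.Str.split₀ box] else acc.1),
         (if grpB (PySem.Str.split₀ box) == 0 then acc.2 else acc.2 ++ [PySem.Str.split₀ box])))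
      ([], [])
      (fun box hbox acc => stepA_eq box (hpre box hbox).1 (hpre box hbox).2 acc)]
  rw [PySem.List.foldl_prod_mk
      (f := fun acc box => if grpB (PySem.Str.split₀ box) == 0 then acc ++ [PySem.Str.split₀ box] else acc)
      (g := fun acc box => if grpB (PySem.Str.split₀ box) == 0 then acc else acc ++ [PySem.Str.split₀ box])]
  rw [PySem.List.foldl_append_if (p := fun box => grpB (PySem.Str.split₀ box) == 0)
      (f := PySem.Str.split₀)]
  rw [PySem.List.foldl_congr_mem' boxList _
      (fun acc box =>
        if !(grpB (PySem.Str.split₀ box) == 0) then acc ++ [PySem.Str.split₀ box] else acc)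
      []
      (fun box _ acc => by by_cases h : (grpB (PySem.Str.split₀ box) == 0) = true <;> simp [h])]
  rw [PySem.List.foldl_append_if (p := fun box => !(grpB (PySem.Str.split₀ box) == 0))
      (f := PySem.Str.split₀)]
  rw [PySem.List.foldl_append_singleton_eq_map, PySem.List.foldl_append_singleton_eq_map]
  rw [sorted2_eq]
  have := foldl_split (boxList.map PySem.Str.split₀) [] [] (by simp) (by simp)
  simp only [List.nil_append] at this
  rw [this, List.filter_map, List.filter_map, ← sortedK_eq, ← sortedK_eq]
  simp [Function.comp_def]
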